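-- pv_equiv track=rewrite | github.com/Naimy441/other_projects | wiki_crawl.py | is_enclosed
-- ===== SOURCE A (Python) =====
-- def is_enclosed(html, url_start_index):
--     html_before_url = html[:url_start_index]
--
--     for type in ('()', '[]', '{}'):
--         open_parethese_count, close_parenthese_count = 0, 0
--
--         for char in html_before_url:
--             if char == type[0]:
--                 open_parethese_count += 1
--             elif char == type[1]:
--                 close_parenthese_count += 1
--
--         if open_parethese_count > close_parenthese_count:
--             return True
--     return False
-- ===== SOURCE B (Python) =====
-- def is_enclosed(html, url_start_index):
--     p = b = c = 0
--     for ch in html[:url_start_index]: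
--         if ch == '(':
--             p += 1
--         elif ch == ')':
--             p -= 1
--         elif ch == '[':
--             b += 1
--         elif ch == ']':
--             b -= 1
--         elif ch == '{':
--             c += 1
--         elif ch == '}':
--             c -= 1
--     return p > 0 or b > 0 or c > 0
-- ===== Notes on version B (the rewrite author's own statement) =====
-- stated objective: faster
-- what changed: B replaces A's three separate scans (one per bracket type, each keeping an open/close counter pair) with a single pass that maintains three net depth counters and then tests them in the same '()','[]','{}' order.
import Mathlib
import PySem

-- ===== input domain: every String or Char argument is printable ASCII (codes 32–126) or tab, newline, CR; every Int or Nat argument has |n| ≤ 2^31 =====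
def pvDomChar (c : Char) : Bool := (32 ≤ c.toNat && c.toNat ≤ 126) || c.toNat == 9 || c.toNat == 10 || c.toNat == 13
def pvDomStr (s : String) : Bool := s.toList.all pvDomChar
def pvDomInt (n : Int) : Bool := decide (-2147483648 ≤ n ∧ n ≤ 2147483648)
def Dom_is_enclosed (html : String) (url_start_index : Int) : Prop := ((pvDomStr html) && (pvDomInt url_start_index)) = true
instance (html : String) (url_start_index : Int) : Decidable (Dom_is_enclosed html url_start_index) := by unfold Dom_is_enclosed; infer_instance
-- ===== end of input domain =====

-- B fuses A's three scans (one per bracket type) into a single pass keeping three net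
-- depth counters, tested afterwards in the same '()','[]','{}' order (objective: faster, constant factor).

-- ===== PORT A =====
-- inner 'for char in html_before_url' loop of A, counting opens and closes of one type
def pvCountPair (before : List Char) (o c : Char) : Int × Int :=
  before.foldl
    (fun st ch =>
      if ch = o then (st.1 + 1, st.2)
      else if ch = c then (st.1, st.2 + 1)
      else st)
    (0, 0)

-- A's outer "for type in ('()', '[]', '{}')" loop with its early return
def pvTypeLoop (types : List (Char × Char)) (before : List Char) : Bool :=
  match types with
  | [] => false
  | (o, c) :: rest =>
    let st := pvCountPair before o c
    if st.1 > st.2 then true else pvTypeLoop rest before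

def is_enclosed (html : String) (url_start_index : Int) : Bool :=
  let html_before_url := PySem.List.slice html.toList none (some url_start_index)
  pvTypeLoop [('(', ')'), ('[', ']'), ('{', '}')] html_before_url

-- ===== PORT B =====
def is_enclosed_alt (html : String) (url_start_index : Int) : Bool :=
  let st := (PySem.List.slice html.toList none (some url_start_index)).foldl
    (fun (s : Int × Int × Int) ch =>
      if ch = '(' then (s.1 + 1, s.2.1, s.2.2)
      else if ch = ')' then (s.1 - 1, s.2.1, s.2.2)
      else if ch = '[' then (s.1, s.2.1 + 1, s.2.2)
      else if ch = ']' then (s.1, s.2.1 - 1, s.2.2)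
      else if ch = '{' then (s.1, s.2.1, s.2.2 + 1)
      else if ch = '}' then (s.1, s.2.1, s.2.2 - 1)
      else s)
    (0, 0, 0)
  st.1 > 0 || st.2.1 > 0 || st.2.2 > 0

-- ===== PRECONDITION & SPEC =====
def Spec_is_enclosed (html : String) (url_start_index : Int) (out : Bool) : Prop := out = is_enclosed_alt html url_start_index
instance (html : String) (url_start_index : Int) (out : Bool) : Decidable (Spec_is_enclosed html url_start_index out) := by unfold Spec_is_enclosed; infer_instance

-- ===== CLAIM (what is proved, stated in full; the proofs are below) =====
def Claim_equal_is_enclosed : Prop := ∀ (html : String) (url_start_index : Int), Dom_is_enclosed html url_start_index → Spec_is_enclosed html url_start_index (is_enclosed html url_start_index)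

-- ===== LEMMAS AND PROOFS =====

-- A's per-type counters are the occurrence counts of the two bracket characters
theorem pvCountPair_aux (before : List Char) (o c : Char) (ho : o ≠ c) (a b : Int) :
    before.foldl
      (fun st ch =>
        if ch = o then (st.1 + 1, st.2)
        else if ch = c then (st.1, st.2 + 1)
        else st)
      (a, b) =
      (a + (before.countP (· = o) : Int), b + (before.countP (· = c) : Int)) := by
  induction before generalizing a b with
  | nil => simp
  | cons ch rest ih =>
    rw [List.foldl_cons]
    simp only [List.countP_cons]
    by_cases h1 : ch = o
    · subst h1
      rw [if_pos rfl, ih (a + 1) b]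
      simp [Prod.ext_iff, ho]
      omega
    · by_cases h2 : ch = c
      · subst h2
        rw [if_neg h1, if_pos rfl, ih a (b + 1)]
        simp [Prod.ext_iff, h1]
        omega
      · rw [if_neg h1, if_neg h2, ih a b]
        simp [h1, h2]

theorem pvCountPair_eq (before : List Char) (o c : Char) (ho : o ≠ c) :
    pvCountPair before o c =
      ((before.countP (· = o) : Int), (before.countP (· = c) : Int)) := by
  unfold pvCountPair
  rw [pvCountPair_aux before o c ho 0 0]
  simp

-- B's fused fold computes the three net depths as count differences
theorem pvFused_aux (before : List Char) (p q r : Int) :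
    before.foldl
      (fun (s : Int × Int × Int) ch =>
        if ch = '(' then (s.1 + 1, s.2.1, s.2.2)
        else if ch = ')' then (s.1 - 1, s.2.1, s.2.2)
        else if ch = '[' then (s.1, s.2.1 + 1, s.2.2)
        else if ch = ']' then (s.1, s.2.1 - 1, s.2.2)
        else if ch = '{' then (s.1, s.2.1, s.2.2 + 1)
        else if ch = '}' then (s.1, s.2.1, s.2.2 - 1)
        else s)
      (p, q, r) =
    (p + (before.countP (· = '(') : Int) - (before.countP (· = ')') : Int),
     q + (before.countP (· = '[') : Int) - (before.countP (· = ']') : Int),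
     r + (before.countP (· = '{') : Int) - (before.countP (· = '}') : Int)) := by
  induction before generalizing p q r with
  | nil => simp
  | cons ch rest ih =>
    rw [List.foldl_cons]
    simp only [List.countP_cons]
    by_cases h1 : ch = '('
    · subst h1; rw [if_pos rfl, ih]; simp [Prod.ext_iff]; omega
    · rw [if_neg h1]
      by_cases h2 : ch = ')'
      · subst h2; rw [if_pos rfl, ih]; simp [Prod.ext_iff, h1]; omega
      · rw [if_neg h2]
        by_cases h3 : ch = '['
        · subst h3; rw [if_pos rfl, ih]; simp [Prod.ext_iff, h1, h2]; omega
        · rw [if_neg h3]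
          by_cases h4 : ch = ']'
          · subst h4; rw [if_pos rfl, ih]; simp [Prod.ext_iff, h1, h2, h3]; omega
          · rw [if_neg h4]
            by_cases h5 : ch = '{'
            · subst h5; rw [if_pos rfl, ih]; simp [Prod.ext_iff, h1, h2, h3, h4]; omega
            · rw [if_neg h5]
              by_cases h6 : ch = '}'
              · subst h6; rw [if_pos rfl, ih]; simp [Prod.ext_iff, h1, h2, h3, h4, h5]
                omega
              · rw [if_neg h6, ih]; simp [h1, h2, h3, h4, h5, h6]

-- ===== VERDICT (by name: the statement is the Claim_ definition above) =====
theorem is_enclosed_spec : Claim_equal_is_enclosed := by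
  intro html i _
  show is_enclosed html i = is_enclosed_alt html i
  unfold is_enclosed is_enclosed_alt
  simp only [pvTypeLoop, pvFused_aux,
    pvCountPair_eq _ '(' ')' (by decide), pvCountPair_eq _ '[' ']' (by decide),
    pvCountPair_eq _ '{' '}' (by decide)]
  split_ifs with h1 h2 h3 <;> simp <;> omega
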